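-- pv_equiv track=rewrite | github.com/bope/adventofcode2018-python | day5/part2.py | prev_solution
-- ===== SOURCE A (Python) =====
-- def prev_solution(input):
--     input = list(input)
--     trigger = True
--     while trigger:
--         for i, (a, b) in enumerate(zip(input, input[1:])):
--             u, l = sorted([a, b])
--             if u.isupper() and l.islower() and u.lower() == l:
--                 input.pop(i)
--                 input.pop(i)
--                 break
--         else:
--             trigger = False
--     return len(input)
-- ===== SOURCE B (Python) =====
-- def prev_solution(input):
--     stack = []
--     for c in input:
--         if stack and stack[-1] != c and stack[-1].lower() == c.lower():
--             stack.pop()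
--         else:
--             stack.append(c)
--     return len(stack)
-- ===== Notes on version B (the rewrite author's own statement) =====
-- stated objective: faster
-- what changed: Replaced the repeated rescan-and-remove-first-matching-pair loop (quadratic) with a single-pass stack that pushes each character or pops when it cancels the top.
import Mathlib
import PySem

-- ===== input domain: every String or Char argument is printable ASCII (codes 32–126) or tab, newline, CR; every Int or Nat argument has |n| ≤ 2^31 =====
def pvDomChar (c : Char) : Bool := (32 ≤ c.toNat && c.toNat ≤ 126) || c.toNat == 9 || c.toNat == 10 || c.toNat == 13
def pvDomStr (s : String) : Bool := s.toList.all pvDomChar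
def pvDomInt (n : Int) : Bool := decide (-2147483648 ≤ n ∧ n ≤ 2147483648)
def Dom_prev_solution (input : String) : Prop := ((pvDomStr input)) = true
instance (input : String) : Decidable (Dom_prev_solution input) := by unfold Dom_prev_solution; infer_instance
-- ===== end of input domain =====

-- B replaces A's quadratic rescan-and-remove loop by a one-pass cancellation stack (asymptotically faster).

-- ===== PORT A =====
-- the `u.isupper() and l.islower() and u.lower() == l` test on (u, l) = sorted([a, b])
def pvCondA (a b : Char) : Bool :=
  let u := if a ≤ b then a else b
  let l := if a ≤ b then b else a
  PySem.Chars.isupper u && PySem.Chars.islower l && (PySem.Chars.lowerChar u == l)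

-- the inner `for … else` pass: first adjacent matching pair removed, or none
def pvFind : List Char → Option (List Char)
  | [] => none
  | [_] => none
  | a :: b :: rest => if pvCondA a b then some rest else (pvFind (b :: rest)).map (a :: ·)

theorem pvFind_length : ∀ {l l' : List Char}, pvFind l = some l' → l'.length < l.length
  | [], _, h => by simp [pvFind] at h
  | [_], _, h => by simp [pvFind] at h
  | a :: b :: rest, l', h => by
    by_cases hc : pvCondA a b = true
    · simp [pvFind, hc] at h; subst h; simp
    · simp [pvFind, hc] at h
      obtain ⟨m, hm, hl'⟩ := h
      have := pvFind_length hm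
      subst hl'
      simp only [List.length_cons] at this ⊢
      omega

-- the `while trigger` loop
def pvReduce (l : List Char) : List Char :=
  match h : pvFind l with
  | none => l
  | some l' => pvReduce l'
termination_by l.length
decreasing_by exact pvFind_length h

def prev_solution (input : String) : Int := ((pvReduce input.toList).length : Int)

-- ===== PORT B =====
-- `stack and stack[-1] != c and stack[-1].lower() == c.lower()`
def pvMatch (t c : Char) : Bool :=
  (t != c) && (PySem.Chars.lowerChar t == PySem.Chars.lowerChar c)

-- one step of B's loop; the stack is kept top-first (head = Python's stack[-1])
def pvStep (s : List Char) (c : Char) : List Char :=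
  match s with
  | [] => [c]
  | t :: r => if pvMatch t c then r else c :: t :: r

def prev_solution_alt (input : String) : Int :=
  ((input.toList.foldl pvStep []).length : Int)

-- ===== PRECONDITION & SPEC =====
def Spec_prev_solution (input : String) (out : Int) : Prop := out = prev_solution_alt input
instance (input : String) (out : Int) : Decidable (Spec_prev_solution input out) := by unfold Spec_prev_solution; infer_instance

-- ===== CLAIM (what is proved, stated in full; the proofs are below) =====
def Claim_equal_prev_solution : Prop := ∀ (input : String), Dom_prev_solution input → Spec_prev_solution input (prev_solution input)

-- ===== LEMMAS AND PROOFS =====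

-- no adjacent matching pair inside the stack (B's loop invariant)
def pvOk (s : List Char) : Prop := List.IsChain (fun x y => pvMatch x y = false) s

theorem pvIsupper_iff (c : Char) : PySem.Chars.isupper c = true ↔ 65 ≤ c.toNat ∧ c.toNat ≤ 90 := by
  simp [PySem.Chars.isupper, Char.le_def, UInt32.le_iff_toNat_le]

theorem pvIslower_iff (c : Char) : PySem.Chars.islower c = true ↔ 97 ≤ c.toNat ∧ c.toNat ≤ 122 := by
  simp [PySem.Chars.islower, Char.le_def, UInt32.le_iff_toNat_le]

theorem pvOfNat_toNat (n : Nat) (h : n < 55296) : (Char.ofNat n).toNat = n := by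
  have hv : n.isValidChar := Or.inl h
  rw [Char.toNat_ofNat]; simp [hv]

theorem pvChar_eq_of_toNat (a b : Char) (h : a.toNat = b.toNat) : a = b :=
  Char.ext (UInt32.toNat_inj.mp h)

-- the two preimages of lowerChar
theorem pvLower_eq_ne {a b : Char} (h : PySem.Chars.lowerChar a = PySem.Chars.lowerChar b)
    (hne : a ≠ b) :
    (65 ≤ a.toNat ∧ a.toNat ≤ 90 ∧ b.toNat = a.toNat + 32) ∨
    (65 ≤ b.toNat ∧ b.toNat ≤ 90 ∧ a.toNat = b.toNat + 32) := by
  unfold PySem.Chars.lowerChar at h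
  by_cases ha : PySem.Chars.isupper a = true <;> by_cases hb : PySem.Chars.isupper b = true
  · exfalso
    have ha' := (pvIsupper_iff a).mp ha
    have hb' := (pvIsupper_iff b).mp hb
    rw [if_pos ha, if_pos hb] at h
    have := congrArg Char.toNat h
    rw [pvOfNat_toNat _ (by omega), pvOfNat_toNat _ (by omega)] at this
    exact hne (pvChar_eq_of_toNat _ _ (by omega))
  · left
    have ha' := (pvIsupper_iff a).mp ha
    rw [if_pos ha, if_neg hb] at h
    have := congrArg Char.toNat h.symm
    rw [pvOfNat_toNat _ (by omega)] at this
    exact ⟨ha'.1, ha'.2, this⟩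
  · right
    have hb' := (pvIsupper_iff b).mp hb
    rw [if_neg ha, if_pos hb] at h
    have := congrArg Char.toNat h
    rw [pvOfNat_toNat _ (by omega)] at this
    exact ⟨hb'.1, hb'.2, this⟩
  · rw [if_neg ha, if_neg hb] at h; exact absurd h hne

theorem pvMatch_iff {a b : Char} : pvMatch a b = true ↔
    a ≠ b ∧ PySem.Chars.lowerChar a = PySem.Chars.lowerChar b := by
  simp [pvMatch]

theorem pvMatch_symm (a b : Char) : pvMatch a b = pvMatch b a := by
  unfold pvMatch
  rw [bne_comm]
  by_cases h : PySem.Chars.lowerChar a = PySem.Chars.lowerChar b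
  · rw [h]
  · rw [beq_eq_false_iff_ne.mpr h, beq_eq_false_iff_ne.mpr (Ne.symm h)]

-- the only char that cancels a given one is unique
theorem pvMatch_uniq {t a b : Char} (h1 : pvMatch t a = true) (h2 : pvMatch a b = true) :
    t = b := by
  obtain ⟨hne1, hl1⟩ := pvMatch_iff.mp h1
  obtain ⟨hne2, hl2⟩ := pvMatch_iff.mp h2
  rcases pvLower_eq_ne hl1 hne1 with ⟨h1a, h1b, h1c⟩ | ⟨h1a, h1b, h1c⟩ <;>
    rcases pvLower_eq_ne hl2 hne2 with ⟨h2a, h2b, h2c⟩ | ⟨h2a, h2b, h2c⟩ <;>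
    exact pvChar_eq_of_toNat _ _ (by omega)

-- Char ≤ as toNat ≤
theorem pvLe_toNat {a b : Char} : a ≤ b ↔ a.toNat ≤ b.toNat := by
  rw [Char.le_def]; exact UInt32.le_iff_toNat_le

-- A's sorted-pair test agrees with B's symmetric test (helper for one orientation)
theorem pvCond_core {a b : Char} (hle : a.toNat ≤ b.toNat) :
    (PySem.Chars.isupper a && PySem.Chars.islower b && (PySem.Chars.lowerChar a == b)) =
      pvMatch a b := by
  by_cases h : (PySem.Chars.isupper a && PySem.Chars.islower b
      && (PySem.Chars.lowerChar a == b)) = true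
  · rw [h]
    simp only [Bool.and_eq_true, beq_iff_eq] at h
    obtain ⟨⟨ha, hb⟩, hl⟩ := h
    have ha' := (pvIsupper_iff a).mp ha
    have hb' := (pvIslower_iff b).mp hb
    symm
    rw [pvMatch_iff]
    constructor
    · intro he; subst he; omega
    · rw [hl]
      unfold PySem.Chars.lowerChar
      rw [if_neg (by rw [pvIsupper_iff]; omega)]
  · rw [Bool.eq_false_iff.mpr h]
    symm
    rw [Bool.eq_false_iff]
    intro hm
    apply h
    obtain ⟨hne, hl⟩ := pvMatch_iff.mp hm
    rcases pvLower_eq_ne hl hne with ⟨h1, h2, h3⟩ | ⟨h1, h2, h3⟩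
    · have ha : PySem.Chars.isupper a = true := (pvIsupper_iff a).mpr ⟨h1, h2⟩
      simp only [Bool.and_eq_true, beq_iff_eq]
      refine ⟨⟨ha, by rw [pvIslower_iff]; omega⟩, ?_⟩
      unfold PySem.Chars.lowerChar
      rw [if_pos ha]
      exact pvChar_eq_of_toNat _ _ (by rw [pvOfNat_toNat _ (by omega)]; omega)
    · omega

theorem pvCondA_eq_match (a b : Char) : pvCondA a b = pvMatch a b := by
  by_cases hle : a ≤ b
  · simp only [pvCondA, if_pos hle]
    exact pvCond_core (pvLe_toNat.mp hle)
  · simp only [pvCondA, if_neg hle]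
    rw [pvMatch_symm]
    exact pvCond_core (by have := pvLe_toNat.not.mp hle; omega)

theorem pvOk_step {s : List Char} (h : pvOk s) (c : Char) : pvOk (pvStep s c) := by
  match s with
  | [] => simp [pvStep, pvOk]
  | t :: r =>
    by_cases hm : pvMatch t c = true
    · simpa [pvStep, hm, pvOk] using h.tail
    · simp only [pvStep, if_neg hm]
      rw [pvOk, List.isChain_cons_cons]
      exact ⟨by rw [pvMatch_symm]; simpa using hm, h⟩

theorem pvStep_cancel {s : List Char} (hok : pvOk s) {a b : Char} (h : pvMatch a b = true) :
    pvStep (pvStep s a) b = s := by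
  match s with
  | [] => simp [pvStep, h]
  | t :: r =>
    by_cases hm : pvMatch t a = true
    · have htb : t = b := pvMatch_uniq hm h
      subst htb
      simp only [pvStep, if_pos hm]
      match r with
      | [] => rfl
      | u :: r' =>
        have hno : pvMatch t u = false := by
          rw [pvOk, List.isChain_cons_cons] at hok
          exact hok.1
        simp [pvMatch_symm u t, hno]
    · simp [pvStep, hm, h]

-- if A's pass finds a pair, removing it does not change B's fold
theorem pvFind_some_fold : ∀ (l l' : List Char), pvFind l = some l' →
    ∀ s, pvOk s → List.foldl pvStep s l = List.foldl pvStep s l'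
  | [], _, h => by simp [pvFind] at h
  | [_], _, h => by simp [pvFind] at h
  | a :: b :: rest, l', h => by
    intro s hok
    by_cases hc : pvCondA a b = true
    · simp only [pvFind, if_pos hc] at h
      obtain rfl := Option.some_inj.mp h
      have hm : pvMatch a b = true := by rw [← pvCondA_eq_match]; exact hc
      simp only [List.foldl_cons]
      rw [pvStep_cancel hok hm]
    · simp only [pvFind, if_neg hc, Option.map_eq_some_iff] at h
      obtain ⟨m, hm, rfl⟩ := h
      have := pvFind_some_fold (b :: rest) m hm (pvStep s a) (pvOk_step hok a)
      simp only [List.foldl_cons] at this ⊢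
      exact this

-- pvFind = none means no adjacent pair matches
theorem pvFind_none_cons {a : Char} {m : List Char} (h : pvFind (a :: m) = none) :
    pvFind m = none ∧ ∀ b r, m = b :: r → pvCondA a b = false := by
  match m with
  | [] => exact ⟨rfl, by intro b r hbr; cases hbr⟩
  | b :: r =>
    by_cases hc : pvCondA a b = true
    · simp [pvFind, hc] at h
    · simp only [pvFind, if_neg hc, Option.map_eq_none_iff] at h
      exact ⟨h, by intro b' r' hbr; cases hbr; simpa using hc⟩

-- on a pair-free list B's stack only grows
theorem pvFind_none_fold : ∀ (l : List Char), pvFind l = none →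
    ∀ s, (∀ t c, s.head? = some t → l.head? = some c → pvMatch t c = false) →
    List.foldl pvStep s l = l.reverse ++ s
  | [], _, _, _ => by simp
  | c :: m, h, s, hs => by
    obtain ⟨hm, hcond⟩ := pvFind_none_cons h
    have hstep : pvStep s c = c :: s := by
      match s with
      | [] => rfl
      | t :: r => simp [pvStep, hs t c rfl rfl]
    rw [List.foldl_cons, hstep,
      pvFind_none_fold m hm (c :: s) (by
        intro t c' ht hc'
        have hct : c = t := by simpa using ht
        subst hct
        cases m with
        | nil => simp at hc'
        | cons b' r' =>
          have hb' : b' = c' := by simpa using hc'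
          have := hcond b' r' rfl
          rw [pvCondA_eq_match] at this
          rw [← hb']
          exact this)]
    simp

theorem pvOk_nil : pvOk [] := by simp [pvOk]

-- B's final stack is the reverse of A's fully reduced list
theorem pvReduce_fold (l : List Char) : List.foldl pvStep [] l = (pvReduce l).reverse := by
  rw [pvReduce]
  split
  · rename_i h
    rw [pvFind_none_fold l h [] (by intro t c ht; cases ht)]
    simp
  · rename_i l' h
    rw [pvFind_some_fold l l' h [] pvOk_nil]
    exact pvReduce_fold l'
termination_by l.length
decreasing_by exact pvFind_length (by assumption)

-- ===== VERDICT (by name: the statement is the Claim_ definition above) =====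
theorem prev_solution_spec : Claim_equal_prev_solution := by
  intro input _
  unfold Spec_prev_solution prev_solution prev_solution_alt
  rw [pvReduce_fold]
  simp
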